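-- pv_equiv track=rewrite | github.com/ethandanielrobinson/public_files | software_and_game_development/dnd_character_manager/function_storage_update.py | list_xnor
-- ===== SOURCE A (Python) =====
-- def list_xnor(in_list: list):
--     """
--     A function that checks a list of inputs and returns true if they are all true or all false,
--     but returns false if some are true and some are false.
--     Parameters:
--         in_list (list): A list of variables, can be of mixed type
--     Returns:
--         OUT (bool): Is the list all of one type?
--     """
--     # we define a count for each true element in the list.  If the count equals the length of the list
--     # (meaning everything in the list is true) or 0 (meaning everything in the list is false), we return
--     # True. If it is not one of those two numbers, we return False.
--     count = 0
--     # we check each element in the list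
--     for elem in in_list:
--         if elem:
--             count += 1
--     if (count == len(in_list) or count == 0):
--         return True
--     else:
--         return False
-- ===== SOURCE B (Python) =====
-- def list_xnor(in_list: list):
--     return len({bool(x) for x in in_list}) <= 1
-- ===== Notes on version B (the rewrite author's own statement) =====
-- stated objective: idiomatic
-- what changed: Instead of counting truthy elements and comparing the count to 0 and len, B collects the set of distinct truthiness values and checks it has at most one element.
import Mathlib
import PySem

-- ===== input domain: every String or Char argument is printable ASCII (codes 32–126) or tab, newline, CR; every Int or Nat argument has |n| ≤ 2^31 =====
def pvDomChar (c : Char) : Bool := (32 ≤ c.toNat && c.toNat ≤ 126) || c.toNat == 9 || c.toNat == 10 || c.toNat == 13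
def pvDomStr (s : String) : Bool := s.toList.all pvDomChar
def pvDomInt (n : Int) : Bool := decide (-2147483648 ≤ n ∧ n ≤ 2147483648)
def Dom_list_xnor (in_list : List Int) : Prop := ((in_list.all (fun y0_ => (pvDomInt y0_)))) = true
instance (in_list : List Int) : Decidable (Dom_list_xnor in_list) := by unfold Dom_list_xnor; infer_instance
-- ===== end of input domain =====

-- B replaces A's truthy-count-vs-length test by collecting the set of distinct truthiness values
-- and checking it has at most one element (idiomatic; same cost).

-- ===== PORT A =====
-- count = 0; for elem in in_list: if elem: count += 1; return count == len or count == 0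
def list_xnor (in_list : List Int) : Bool :=
  let count : Int := in_list.foldl (fun count elem => if elem ≠ 0 then count + 1 else count) 0
  if count = (in_list.length : Int) ∨ count = 0 then true else false

-- ===== PORT B =====
-- return len({bool(x) for x in in_list}) <= 1
def list_xnor_alt (in_list : List Int) : Bool :=
  decide ((PySem.Set.ofList (in_list.map (fun x => decide (x ≠ 0)))).length ≤ 1)

-- ===== PRECONDITION & SPEC =====
def Spec_list_xnor (in_list : List Int) (out : Bool) : Prop := out = list_xnor_alt in_list
instance (in_list : List Int) (out : Bool) : Decidable (Spec_list_xnor in_list out) := by unfold Spec_list_xnor; infer_instance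

-- ===== CLAIM (what is proved, stated in full; the proofs are below) =====
def Claim_equal_list_xnor : Prop := ∀ (in_list : List Int), Dom_list_xnor in_list → Spec_list_xnor in_list (list_xnor in_list)

-- ===== LEMMAS AND PROOFS =====

-- A's foldl is a countP
theorem list_xnor_count (xs : List Int) :
    xs.foldl (fun count elem => if elem ≠ 0 then count + 1 else count) 0
      = (xs.countP (fun x => decide (x ≠ 0)) : Int) := by
  rw [List.foldl_ext
        (g := fun (count : Int) elem => if (fun x => decide (x ≠ 0)) elem = true then count + 1 else count)
        (H := by intro a x _; by_cases h : x = 0 <;> simp [h]),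
      PySem.List.foldl_count_if]
  omega

-- a duplicate-free list has at most one element iff all its elements are equal
theorem nodup_len_le_one {α : Type} (l : List α) (h : l.Nodup) :
    l.length ≤ 1 ↔ ∀ a ∈ l, ∀ b ∈ l, a = b := by
  match l with
  | [] => simp
  | [a] => simp
  | a :: b :: t =>
    simp only [List.length_cons]
    constructor
    · omega
    · intro hall
      exact absurd (hall a (by simp) b (by simp)) (by simp [List.nodup_cons] at h; simp [h])

theorem list_xnor_spec_aux (xs : List Int) : list_xnor xs = list_xnor_alt xs := by
  simp only [list_xnor, list_xnor_alt, list_xnor_count]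
  rw [decide_eq_decide.mpr
        (nodup_len_le_one _ (PySem.Set.nodup_ofList _))]
  by_cases hA : (xs.countP (fun x => decide (x ≠ 0)) : Int) = (xs.length : Int)
             ∨ (xs.countP (fun x => decide (x ≠ 0)) : Int) = 0
  · simp only [hA, if_true]
    symm
    rw [decide_eq_true_iff]
    intro a ha b hb
    simp only [PySem.Set.mem_ofList, List.mem_map] at ha hb
    obtain ⟨x, hx, rfl⟩ := ha
    obtain ⟨y, hy, rfl⟩ := hb
    rcases hA with h | h
    · have : ∀ z ∈ xs, z ≠ 0 := by
        have := (List.countP_eq_length (p := fun x => decide (x ≠ 0)) (l := xs)).mp (by exact_mod_cast h)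
        intro z hz; simpa using this z hz
      simp [this x hx, this y hy]
    · have : ∀ z ∈ xs, z = 0 := by
        have := (List.countP_eq_zero (p := fun x => decide (x ≠ 0)) (l := xs)).mp (by exact_mod_cast h)
        intro z hz; simpa using this z hz
      simp [this x hx, this y hy]
  · simp only [hA, if_false]
    symm
    rw [decide_eq_false_iff_not]
    intro hall
    apply hA
    by_cases hex : ∃ x ∈ xs, x ≠ 0
    · left
      obtain ⟨x, hx, hx0⟩ := hex
      have : ∀ z ∈ xs, z ≠ 0 := by
        intro z hz hz0
        have := hall (decide (x ≠ 0))
                     (by rw [PySem.Set.mem_ofList]; exact List.mem_map.mpr ⟨x, hx, rfl⟩)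
                     (decide (z ≠ 0))
                     (by rw [PySem.Set.mem_ofList]; exact List.mem_map.mpr ⟨z, hz, rfl⟩)
        simp [hx0, hz0] at this
      have := (List.countP_eq_length (p := fun x => decide (x ≠ 0)) (l := xs)).mpr
        (by intro z hz; simpa using this z hz)
      exact_mod_cast this
    · right
      rw [not_exists] at hex
      simp only [not_and, not_not] at hex
      have := (List.countP_eq_zero (p := fun x => decide (x ≠ 0)) (l := xs)).mpr
        (by intro z hz; simpa using hex z hz)
      exact_mod_cast this

-- ===== VERDICT (by name: the statement is the Claim_ definition above) =====
theorem list_xnor_spec : Claim_equal_list_xnor := by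
  intro xs _
  exact list_xnor_spec_aux xs
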